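-- pv_equiv track=rewrite | github.com/akakss225/Python_tutorial | CREMA.py | bitwiseEquations
-- ===== SOURCE A (Python) =====
-- def bitwiseEquations(a, b):
--     answer = []
--     # list a 의 길이만큼 반복문 실행 >> len(a) == len(b)
--     for i in range(len(a)):
--         # 반복문 진행마다 결과값을 담을 result변수 초기화
--         result = 0
--
--         # x값이 a[i] 의 반일때 까지만 실행 >> 넘어가면 결국 같아지기 떄문
--         for j in range(1, a[i] // 2 + 1):
--             # x + y = a[i] 가 되게 설정 >> x가 0인 경우는 skip
--             x = j
--             y = a[i] - j
--             # x ^ y (x XOR y) == b[i] 인 경우 result에 담아주고 반복문 탈출 >> x 가 최소인 경우만을 찾음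
--             # break를 안거치고, for 문을 끝까지 돌면, result = 0 인 상태로 빠져나감
--             if x ^ y == b[i]:
--                 result = (2 * x) + (3 * y)
--                 break
--         # list에 순서대로 append
--         answer.append(result)
--     return answer
-- ===== SOURCE B (Python) =====
-- def _solve(ai, bi):
--     # closed form: x & y = (ai - bi) / 2, x ^ y = bi; minimal x is c (if c > 0)
--     # or the lowest set bit of bi (if c == 0), when a valid pair exists.
--     d = ai - bi
--     if ai < 2 or bi < 0 or d < 0 or d % 2 != 0:
--         return 0
--     c = d // 2
--     if c & bi != 0:
--         return 0
--     if c > 0: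
--         x = c
--     else:
--         x = bi ^ (bi & (bi - 1))  # lowest set bit of bi (bi > 0 here)
--         if 2 * x > bi:
--             return 0
--     return 2 * x + 3 * (ai - x)
--
-- def bitwiseEquations(a, b):
--     return [_solve(ai, bi) for ai, bi in zip(a, b)]
-- ===== Notes on version B (the rewrite author's own statement) =====
-- stated objective: faster
-- what changed: replaces A's per-pair linear scan over all candidate x in [1, a_i//2] by an O(1) closed form: x&y must equal (a_i-b_i)/2 and x^y=b_i, so the minimal x is c=(a_i-b_i)/2 when c>0, else the lowest set bit of b_i, with feasibility checks.
-- outside the precondition, e.g. on bitwiseEquations([-1, -2, 0, 0], [10, 0]): A returns [0, 0, 0, 0], B returns [0, 0]; on bitwiseEquations([2], []): A raises IndexError, B returns []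
import Mathlib
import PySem

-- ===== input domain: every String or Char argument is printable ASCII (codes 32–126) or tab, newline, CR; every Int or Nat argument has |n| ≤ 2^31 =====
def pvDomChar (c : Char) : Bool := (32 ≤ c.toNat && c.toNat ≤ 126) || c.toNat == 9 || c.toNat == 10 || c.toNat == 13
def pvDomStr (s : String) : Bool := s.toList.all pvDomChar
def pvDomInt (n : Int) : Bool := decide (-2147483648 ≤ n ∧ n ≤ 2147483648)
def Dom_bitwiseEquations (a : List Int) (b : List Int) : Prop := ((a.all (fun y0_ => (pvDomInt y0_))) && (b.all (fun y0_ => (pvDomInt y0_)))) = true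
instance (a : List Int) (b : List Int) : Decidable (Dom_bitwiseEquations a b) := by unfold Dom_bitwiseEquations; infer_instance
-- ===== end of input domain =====

-- B replaces A's per-pair linear scan for the minimal x with an O(1) bit-arithmetic closed form (objective: faster).

-- ===== PORT A =====
-- inner loop 'for j in range(1, a[i] // 2 + 1): … break': first matching j wins, else result stays 0
def pyLoopA (ai bi : Int) : List Int → Int
  | [] => 0
  | j :: rest =>
    let x := j
    let y := ai - j
    if PySem.Int.bxor x y == bi then (2 * x) + (3 * y) else pyLoopA ai bi rest

def pyInnerA (ai bi : Int) : Int :=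
  pyLoopA ai bi (PySem.List.pyRange 1 (PySem.Int.floordiv ai 2 + 1) 1)

def bitwiseEquations (a : List Int) (b : List Int) : List Int :=
  (PySem.List.pyRange 0 (PySem.List.len a) 1).foldl
    (fun answer i =>
      answer ++ [pyInnerA (PySem.List.pyGetD a i 0) (PySem.List.pyGetD b i 0)]) []

-- ===== PORT B =====
def solveAlt (ai bi : Int) : Int :=
  let d := ai - bi
  if ai < 2 ∨ bi < 0 ∨ d < 0 ∨ PySem.Int.mod d 2 ≠ 0 then 0
  else
    let c := PySem.Int.floordiv d 2
    if PySem.Int.band c bi ≠ 0 then 0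
    else if 0 < c then 2 * c + 3 * (ai - c)
    else
      let x := PySem.Int.bxor bi (PySem.Int.band bi (bi - 1))
      if 2 * x > bi then 0 else 2 * x + 3 * (ai - x)

def bitwiseEquations_alt (a : List Int) (b : List Int) : List Int :=
  (a.zip b).map (fun p => solveAlt p.1 p.2)

-- ===== PRECONDITION & SPEC =====
-- Pre_ excludes len(b) < len(a): there A raises IndexError at the first i >= len(b) whose a[i] >= 2, and when every such a[i] < 2 it returns accidental padding zeros for the missing pairs, both of which B (zip, truncating) does not reproduce.
def Pre_bitwiseEquations (a : List Int) (b : List Int) : Prop := a.length ≤ b.length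
instance (a : List Int) (b : List Int) : Decidable (Pre_bitwiseEquations a b) := by unfold Pre_bitwiseEquations; infer_instance

def pvWitness_bitwiseEquations : List Int × List Int := ([2, 3], [0, 3])

def Spec_bitwiseEquations (a : List Int) (b : List Int) (out : List Int) : Prop := out = bitwiseEquations_alt a b
instance (a : List Int) (b : List Int) (out : List Int) : Decidable (Spec_bitwiseEquations a b out) := by unfold Spec_bitwiseEquations; infer_instance

-- ===== CLAIM (what is proved, stated in full; the proofs are below) =====
def Claim_equal_bitwiseEquations : Prop := ∀ (a : List Int) (b : List Int), Dom_bitwiseEquations a b → Pre_bitwiseEquations a b → Spec_bitwiseEquations a b (bitwiseEquations a b)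

-- ===== LEMMAS AND PROOFS =====

-- binary-digit recurrences for xor and and
theorem pv_xor_two (i j : Bool) (m k : Nat) :
    (2 * m + i.toNat) ^^^ (2 * k + j.toNat) = 2 * (m ^^^ k) + (i != j).toNat := by
  rw [← Nat.bit_val, ← Nat.bit_val, Nat.xor_bit, Nat.bit_val]

theorem pv_and_two (i j : Bool) (m k : Nat) :
    (2 * m + i.toNat) &&& (2 * k + j.toNat) = 2 * (m &&& k) + (i && j).toNat := by
  rw [← Nat.bit_val, ← Nat.bit_val, Nat.land_bit, Nat.bit_val]

-- the key additive identity: u + v = (u ^ v) + 2 * (u & v)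
theorem pv_add_eq (u : Nat) : ∀ v : Nat, u + v = (u ^^^ v) + 2 * (u &&& v) := by
  induction u using Nat.strong_induction_on with
  | _ u ih =>
    intro v
    rcases Nat.eq_zero_or_pos u with hu0 | hu0
    · subst hu0; simp
    rcases Nat.even_or_odd u with ⟨m, hm⟩ | ⟨m, hm⟩ <;>
      rcases Nat.even_or_odd v with ⟨k, hk⟩ | ⟨k, hk⟩ <;>
      [ (have eu : u = 2 * m + (false : Bool).toNat := by simp only [Bool.toNat_false]; omega);
        (have eu : u = 2 * m + (false : Bool).toNat := by simp only [Bool.toNat_false]; omega);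
        (have eu : u = 2 * m + (true : Bool).toNat := by simp only [Bool.toNat_true]; omega);
        (have eu : u = 2 * m + (true : Bool).toNat := by simp only [Bool.toNat_true]; omega) ] <;>
      [ (have ev : v = 2 * k + (false : Bool).toNat := by simp only [Bool.toNat_false]; omega);
        (have ev : v = 2 * k + (true : Bool).toNat := by simp only [Bool.toNat_true]; omega);
        (have ev : v = 2 * k + (false : Bool).toNat := by simp only [Bool.toNat_false]; omega);
        (have ev : v = 2 * k + (true : Bool).toNat := by simp only [Bool.toNat_true]; omega) ] <;>
      · have hih := ih m (by omega) k
        rw [eu, ev, pv_xor_two, pv_and_two]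
        simp only [Bool.toNat_false, Bool.toNat_true, bne_self_eq_false, Bool.and_self,
          Bool.and_false, Bool.and_true, Bool.false_and, Bool.true_and, Bool.false_bne,
          Bool.true_bne, Bool.not_false, Bool.not_true]
        omega

theorem pv_and_and_xor (u v : Nat) : (u &&& v) &&& (u ^^^ v) = 0 := by
  apply Nat.eq_of_testBit_eq; intro i
  simp only [Nat.testBit_and, Nat.testBit_xor, Nat.zero_testBit]
  cases u.testBit i <;> cases v.testBit i <;> rfl

theorem pv_disj_add (c s : Nat) (h : c &&& s = 0) : c + s = c ^^^ s := by
  rw [pv_add_eq c s, h]; omega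

theorem pv_decomp (u v : Nat) : u = (u &&& v) + (u &&& (u ^^^ v)) := by
  have hd : (u &&& v) &&& (u &&& (u ^^^ v)) = 0 := by
    apply Nat.eq_of_testBit_eq; intro i
    simp only [Nat.testBit_and, Nat.testBit_xor, Nat.zero_testBit]
    cases u.testBit i <;> cases v.testBit i <;> rfl
  have hx : (u &&& v) ^^^ (u &&& (u ^^^ v)) = u := by
    apply Nat.eq_of_testBit_eq; intro i
    simp only [Nat.testBit_and, Nat.testBit_xor]
    cases u.testBit i <;> cases v.testBit i <;> rfl
  rw [pv_disj_add _ _ hd]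
  exact hx.symm

theorem pv_subset_xor (s b : Nat) (_h : s &&& b = s) : s ^^^ (b ^^^ s) = b := by
  rw [Nat.xor_comm b s, Nat.xor_xor_cancel_left]

theorem pv_subset_add (s b : Nat) (h : s &&& b = s) : s + (b ^^^ s) = b := by
  have hd : s &&& (b ^^^ s) = 0 := by
    apply Nat.eq_of_testBit_eq; intro i
    have hi := congrArg (fun t => t.testBit i) h
    simp only [Nat.testBit_and] at hi
    simp only [Nat.testBit_and, Nat.testBit_xor, Nat.zero_testBit]
    cases hs : s.testBit i <;> cases hbb : b.testBit i <;> simp_all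
  rw [pv_disj_add s (b ^^^ s) hd]
  exact pv_subset_xor s b h

-- lowest set bit: b ^ (b & (b - 1))
def lowb (b : Nat) : Nat := b ^^^ (b &&& (b - 1))

theorem pv_lowb (b : Nat) : 0 < b →
    (lowb b) &&& b = lowb b ∧ 0 < lowb b ∧ ∀ s, s ≠ 0 → s &&& b = s → lowb b ≤ s := by
  induction b using Nat.strong_induction_on with
  | _ b ih =>
    intro hb
    rcases Nat.even_or_odd b with ⟨m, hm⟩ | ⟨m, hm⟩
    · -- b even: b = 2*m, m > 0
      have hmpos : 0 < m := by omega
      have eb : b = 2 * m + (false : Bool).toNat := by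
        simp only [Bool.toNat_false]; omega
      have eb1 : b - 1 = 2 * (m - 1) + (true : Bool).toNat := by
        simp only [Bool.toNat_true]; omega
      obtain ⟨ih1, ih2, ih3⟩ := ih m (by omega) hmpos
      have hrec : lowb b = 2 * lowb m := by
        unfold lowb
        rw [eb1, eb, pv_and_two]
        simp only [Bool.and_true]
        rw [pv_xor_two]
        simp only [bne_self_eq_false, Bool.toNat_false, lowb]
        omega
      refine ⟨?_, by omega, ?_⟩
      · rw [hrec, eb,
          show 2 * lowb m = 2 * lowb m + (false : Bool).toNat by rfl, pv_and_two]
        simp only [Bool.and_false, Bool.toNat_false]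
        omega
      · intro s hs0 hsb
        rcases Nat.even_or_odd s with ⟨t, ht⟩ | ⟨t, ht⟩
        · have es : s = 2 * t + (false : Bool).toNat := by
            simp only [Bool.toNat_false]; omega
          rw [es, eb, pv_and_two] at hsb
          simp only [Bool.and_false, Bool.toNat_false] at hsb
          have htm : t &&& m = t := by omega
          have := ih3 t (by omega) htm
          rw [hrec]; omega
        · have es : s = 2 * t + (true : Bool).toNat := by
            simp only [Bool.toNat_true]; omega
          rw [es, eb, pv_and_two] at hsb
          simp only [Bool.and_false, Bool.toNat_true, Bool.toNat_false, Bool.true_and] at hsb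
          omega
    · -- b odd: b = 2*m + 1
      have eb : b = 2 * m + (true : Bool).toNat := by
        simp only [Bool.toNat_true]; omega
      have eb1 : b - 1 = 2 * m + (false : Bool).toNat := by
        simp only [Bool.toNat_false]; omega
      have hrec : lowb b = 1 := by
        unfold lowb
        rw [eb1, eb, pv_and_two]
        simp only [Bool.and_false, Nat.and_self]
        rw [pv_xor_two]
        norm_num
      refine ⟨?_, by omega, by intro s hs0 _; omega⟩
      rw [hrec, eb, show (1 : Nat) = 2 * 0 + (true : Bool).toNat by rfl, pv_and_two]
      simp only [Bool.and_true, Nat.zero_and]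

-- characterisation of a solution of the loop's test, on the Nat side
-- if u + y = n and u ^ y = b then n = b + 2 * (u & y), (u & y) & b = 0 and u = (u & y) + (u & b)
theorem pv_sol_shape (u y n b : Nat) (hsum : u + y = n) (hxor : u ^^^ y = b) :
    n = b + 2 * (u &&& y) ∧ (u &&& y) &&& b = 0 ∧ u = (u &&& y) + (u &&& b) := by
  refine ⟨by rw [← hsum, pv_add_eq u y, hxor], by rw [← hxor]; exact pv_and_and_xor u y, ?_⟩
  conv_lhs => rw [pv_decomp u y]
  rw [hxor]

-- ===== loop lemmas =====
theorem pyLoopA_none (ai bi : Int) (l : List Int)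
    (h : ∀ j ∈ l, ¬ (PySem.Int.bxor j (ai - j) = bi)) : pyLoopA ai bi l = 0 := by
  induction l with
  | nil => rfl
  | cons j rest ihl =>
    simp only [pyLoopA]
    rw [if_neg]
    · exact ihl (fun x hx => h x (List.mem_cons_of_mem _ hx))
    · simp only [beq_iff_eq]; exact h j (List.mem_cons_self)

theorem pyLoopA_min (ai bi : Int) (l : List Int) (hl : l.Pairwise (· < ·)) (j₀ : Int)
    (hmem : j₀ ∈ l) (hj : PySem.Int.bxor j₀ (ai - j₀) = bi)
    (hmin : ∀ j ∈ l, PySem.Int.bxor j (ai - j) = bi → j₀ ≤ j) :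
    pyLoopA ai bi l = 2 * j₀ + 3 * (ai - j₀) := by
  induction l with
  | nil => exact absurd hmem (List.not_mem_nil)
  | cons j rest ihl =>
    simp only [pyLoopA]
    rcases List.mem_cons.mp hmem with hje | hjr
    · subst hje; rw [if_pos (by simp only [beq_iff_eq]; exact hj)]
    · have hlt : j < j₀ := (List.pairwise_cons.mp hl).1 j₀ hjr
      rw [if_neg]
      · exact ihl (List.pairwise_cons.mp hl).2 hjr
          (fun x hx hx2 => hmin x (List.mem_cons_of_mem _ hx) hx2)
      · simp only [beq_iff_eq]
        intro hc
        exact absurd (hmin j (List.mem_cons_self) hc) (by omega)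

-- ===== per-pair equivalence =====
-- for 2 ≤ ai and a member j of range(1, ai//2+1), the loop test computed over Nat
theorem pv_test_cast (ai : Int) (n u : Nat) (hai : ai = (n : Int)) (hu : u ≤ n) :
    PySem.Int.bxor (u : Int) (ai - (u : Int)) = ((u ^^^ (n - u) : Nat) : Int) := by
  rw [show ai - (u : Int) = ((n - u : Nat) : Int) by omega, PySem.Int.bxor_natCast]

theorem pv_pair (ai bi : Int) : pyInnerA ai bi = solveAlt ai bi := by
  unfold pyInnerA solveAlt
  by_cases ha2 : ai < 2
  · -- range(1, ai//2+1) is empty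
    have hflt : PySem.Int.floordiv ai 2 < 1 :=
      (PySem.Int.floordiv_lt_iff_lt_mul (by omega : (0:Int) < 2)).mpr (by omega)
    rw [PySem.List.pyRange_one, show ((PySem.Int.floordiv ai 2 + 1) - 1).toNat = 0 by omega,
      if_pos (Or.inl ha2)]
    rfl
  · push_neg at ha2
    obtain ⟨n, hai⟩ : ∃ n : Nat, ai = (n : Int) := ⟨ai.toNat, by omega⟩
    have hn2 : 2 ≤ n := by omega
    have hfd : PySem.Int.floordiv ai 2 = ((n / 2 : Nat) : Int) := by
      rw [hai]; exact_mod_cast PySem.Int.floordiv_natCast n 2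
    have hmem : ∀ j : Int, j ∈ PySem.List.pyRange 1 (PySem.Int.floordiv ai 2 + 1) 1 ↔
        (1 ≤ j ∧ j ≤ ((n / 2 : Nat) : Int)) := by
      intro j; rw [PySem.List.mem_pyRange_one, hfd]; omega
    -- a member of the range as a Nat
    have hnat : ∀ j : Int, 1 ≤ j → j ≤ ((n / 2 : Nat) : Int) →
        ∃ u : Nat, j = (u : Int) ∧ 1 ≤ u ∧ u ≤ n / 2 := by
      intro j h1 h2; exact ⟨j.toNat, by omega, by omega, by omega⟩
    by_cases hb0 : bi < 0
    · -- xor of nonnegatives can never be negative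
      rw [pyLoopA_none, if_pos (Or.inr (Or.inl hb0))]
      intro j hj
      obtain ⟨u, rfl, hu1, hu2⟩ := hnat j ((hmem j).mp hj).1 ((hmem j).mp hj).2
      rw [pv_test_cast ai n u hai (by omega)]
      omega
    · push_neg at hb0
      obtain ⟨b, hbi⟩ : ∃ b : Nat, bi = (b : Int) := ⟨bi.toNat, by omega⟩
      by_cases hd : b ≤ n ∧ (n - b) % 2 = 0
      · -- a candidate c = (n-b)/2 exists on the Nat side
        obtain ⟨hbn, hpar⟩ := hd
        set c := (n - b) / 2 with hcdef
        have hnc : n = b + 2 * c := by omega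
        have hdint : ai - bi = ((n - b : Nat) : Int) := by omega
        have hfirst : ¬ (ai < 2 ∨ bi < 0 ∨ ai - bi < 0 ∨ PySem.Int.mod (ai - bi) 2 ≠ 0) := by
          rw [hdint, show (2 : Int) = ((2 : Nat) : Int) by rfl, PySem.Int.mod_natCast]
          push_neg
          exact ⟨by omega, by omega, by omega, by exact_mod_cast hpar⟩
        rw [if_neg hfirst]
        have hfc : PySem.Int.floordiv (ai - bi) 2 = (c : Int) := by
          rw [hdint, show (2 : Int) = ((2 : Nat) : Int) by rfl, PySem.Int.floordiv_natCast]
        rw [hfc]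
        by_cases hcb : c &&& b = 0
        · rw [if_neg (by rw [hbi, PySem.Int.band_natCast]; exact_mod_cast
            not_not_intro hcb)]
          by_cases hcpos : 0 < c
          · -- least solution is x = c
            rw [if_pos (by exact_mod_cast hcpos)]
            apply pyLoopA_min ai bi _ (PySem.List.pairwise_lt_pyRange_one _ _) (c : Int)
            · exact (hmem (c : Int)).mpr ⟨by omega, by omega⟩
            · rw [pv_test_cast ai n c hai (by omega), hbi,
                show n - c = c + b by omega, pv_disj_add c b hcb, Nat.xor_xor_cancel_left]
            · intro j hj hsol
              obtain ⟨u, rfl, hu1, hu2⟩ := hnat j ((hmem j).mp hj).1 ((hmem j).mp hj).2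
              rw [pv_test_cast ai n u hai (by omega), hbi] at hsol
              have hEq' : u ^^^ (n - u) = b := by exact_mod_cast hsol
              obtain ⟨h1, _, h3⟩ := pv_sol_shape u (n - u) n b (by omega) hEq'
              omega
          · -- c = 0, so n = b: least solution, if any, is the lowest set bit of b
            rw [if_neg (by exact_mod_cast hcpos)]
            have hnb : n = b := by omega
            have hb2 : 2 ≤ b := by omega
            have hxl : PySem.Int.bxor bi (PySem.Int.band bi (bi - 1)) =
                ((lowb b : Nat) : Int) := by
              rw [hbi, show (b : Int) - 1 = ((b - 1 : Nat) : Int) by omega,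
                PySem.Int.band_natCast, PySem.Int.bxor_natCast]
              rfl
            rw [hxl]
            obtain ⟨hsub, hlpos, hminb⟩ := pv_lowb b (by omega)
            have hsubadd := pv_subset_add (lowb b) b hsub
            by_cases hL : 2 * lowb b ≤ b
            · rw [if_neg (by rw [hbi]; omega)]
              apply pyLoopA_min ai bi _ (PySem.List.pairwise_lt_pyRange_one _ _)
                ((lowb b : Nat) : Int)
              · exact (hmem _).mpr ⟨by omega, by omega⟩
              · rw [pv_test_cast ai n (lowb b) hai (by omega), hbi,
                  show n - lowb b = b ^^^ lowb b by omega, pv_subset_xor (lowb b) b hsub]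
              · intro j hj hsol
                obtain ⟨u, rfl, hu1, hu2⟩ := hnat j ((hmem j).mp hj).1 ((hmem j).mp hj).2
                rw [pv_test_cast ai n u hai (by omega), hbi] at hsol
                have hEq' : u ^^^ (n - u) = b := by exact_mod_cast hsol
                obtain ⟨h1, _, h3⟩ := pv_sol_shape u (n - u) n b (by omega) hEq'
                have hub : u &&& b = u := by omega
                have := hminb u (by omega) hub
                omega
            · -- b is a single bit: its lowest bit is more than half of it, no solution
              rw [if_pos (by rw [hbi]; omega)]
              apply pyLoopA_none
              intro j hj
              obtain ⟨u, rfl, hu1, hu2⟩ := hnat j ((hmem j).mp hj).1 ((hmem j).mp hj).2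
              rw [pv_test_cast ai n u hai (by omega), hbi]
              intro hEq
              have hEq' : u ^^^ (n - u) = b := by exact_mod_cast hEq
              obtain ⟨h1, _, h3⟩ := pv_sol_shape u (n - u) n b (by omega) hEq'
              have hub : u &&& b = u := by omega
              have := hminb u (by omega) hub
              omega
        · -- c shares a bit with b: no solution
          rw [if_pos (by rw [hbi, PySem.Int.band_natCast]; exact_mod_cast hcb)]
          apply pyLoopA_none
          intro j hj
          obtain ⟨u, rfl, hu1, hu2⟩ := hnat j ((hmem j).mp hj).1 ((hmem j).mp hj).2
          rw [pv_test_cast ai n u hai (by omega), hbi]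
          intro hEq
          have hEq' : u ^^^ (n - u) = b := by exact_mod_cast hEq
          obtain ⟨h1, h2, _⟩ := pv_sol_shape u (n - u) n b (by omega) hEq'
          have hce : u &&& (n - u) = c := by omega
          rw [hce] at h2
          exact hcb h2
      · -- d < 0 or d odd: no solution, and B's first guard fires
        have hfirst : ai < 2 ∨ bi < 0 ∨ ai - bi < 0 ∨ PySem.Int.mod (ai - bi) 2 ≠ 0 := by
          by_cases hbn : b ≤ n
          · refine Or.inr (Or.inr (Or.inr ?_))
            rw [show ai - bi = ((n - b : Nat) : Int) by omega,
              show (2 : Int) = ((2 : Nat) : Int) by rfl, PySem.Int.mod_natCast]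
            have : (n - b) % 2 = 1 := by omega
            omega
          · exact Or.inr (Or.inr (Or.inl (by omega)))
        rw [if_pos hfirst, pyLoopA_none]
        intro j hj
        obtain ⟨u, rfl, hu1, hu2⟩ := hnat j ((hmem j).mp hj).1 ((hmem j).mp hj).2
        rw [pv_test_cast ai n u hai (by omega), hbi]
        intro hEq
        have hEq' : u ^^^ (n - u) = b := by exact_mod_cast hEq
        obtain ⟨h1, _, _⟩ := pv_sol_shape u (n - u) n b (by omega) hEq'
        exact hd (by omega)

-- ===== list-level assembly =====
theorem pv_zip (F : Int → Int → Int) : ∀ (a b : List Int), a.length ≤ b.length →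
    (List.range a.length).map (fun k => F (a.getD k 0) (b.getD k 0)) =
      (a.zip b).map (fun p => F p.1 p.2)
  | [], _, _ => by simp
  | x :: xs, [], h => by simp at h
  | x :: xs, y :: ys, h => by
    simp only [List.length_cons, List.range_succ_eq_map, List.map_cons, List.map_map,
      List.getD_cons_zero, List.zip_cons_cons]
    congr 1
    rw [← pv_zip F xs ys (by simpa using h)]
    apply List.map_congr_left
    intro k _
    simp

theorem pv_list (a b : List Int) (h : a.length ≤ b.length) :
    bitwiseEquations a b = (a.zip b).map (fun p => pyInnerA p.1 p.2) := by
  unfold bitwiseEquations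
  rw [PySem.List.len_eq, PySem.List.pyRange_one, List.foldl_map,
    PySem.List.foldl_append_singleton_eq_map]
  simp only [List.nil_append, zero_add, PySem.List.pyGetD_natCast]
  rw [show (((a.length : Int)) - 0).toNat = a.length by omega]
  exact pv_zip (fun u v => pyInnerA u v) a b h

-- ===== VERDICT (by name: the statement is the Claim_ definition above) =====
theorem bitwiseEquations_spec : Claim_equal_bitwiseEquations := by
  intro a b _ hpre
  unfold Spec_bitwiseEquations bitwiseEquations_alt
  rw [pv_list a b hpre]
  exact List.map_congr_left (fun p _ => pv_pair p.1 p.2)
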